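-- pv_equiv track=rewrite | github.com/pypi-data/pypi-mirror-51 | packages/gtfinder/gtfinder-1.1.1.tar.gz/gtfinder-1.1.1/gtfinder/ExtensiveFormGame.py | get_common_actions
-- ===== SOURCE A (Python) =====
-- def get_common_actions(strategies):
--     '''
--     get the actions in common between a list of strategies
--     :param strategies:
--     :return:
--     '''
--     new = []
--     for action in strategies[0]:
--         flag = True
--         for strategy in strategies[1:]:
--             if action not in strategy:
--                 flag = False
--         if flag:
--             new.append(action)
--     return new
-- ===== SOURCE B (Python) =====
-- def get_common_actions(strategies):
--     common = None
--     for strategy in strategies[1:]: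
--         s = set(strategy)
--         common = s if common is None else common & s
--     return [a for a in strategies[0] if common is None or a in common]
-- ===== Notes on version B (the rewrite author's own statement) =====
-- stated objective: faster
-- what changed: Builds the intersection of the tail strategies once as a set, then filters strategies[0] in a single pass, instead of re-scanning every tail strategy for each action.
import Mathlib
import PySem

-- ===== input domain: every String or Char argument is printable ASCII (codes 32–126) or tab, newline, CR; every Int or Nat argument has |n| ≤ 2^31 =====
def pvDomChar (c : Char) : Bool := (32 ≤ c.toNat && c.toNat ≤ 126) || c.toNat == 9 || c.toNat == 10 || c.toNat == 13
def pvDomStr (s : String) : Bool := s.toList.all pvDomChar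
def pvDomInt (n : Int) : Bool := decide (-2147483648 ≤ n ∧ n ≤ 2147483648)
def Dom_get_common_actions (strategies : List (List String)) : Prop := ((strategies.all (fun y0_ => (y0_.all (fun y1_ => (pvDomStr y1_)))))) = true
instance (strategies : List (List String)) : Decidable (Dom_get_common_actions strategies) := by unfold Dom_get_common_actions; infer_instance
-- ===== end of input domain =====

-- B builds the intersection of the tail strategies once as a set, then filters the
-- first strategy in one pass (faster: no repeated scans of the tail per action).

-- ===== PORT A =====
def get_common_actions (strategies : List (List String)) : List String :=
  match strategies with
  | [] => []   -- Python raises IndexError on strategies[0]; excluded by Pre_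
  | first :: rest =>
    first.foldl (fun new action =>
      let flag := rest.foldl (fun flag strategy =>
        if action ∉ strategy then false else flag) true
      if flag then new ++ [action] else new) []

-- ===== PORT B =====
def get_common_actions_alt (strategies : List (List String)) : List String :=
  match strategies with
  | [] => []   -- Source B raises IndexError on strategies[0]; excluded by Pre_
  | first :: rest =>
    let common : Option (PySem.Set String) :=
      rest.foldl (fun common strategy =>
        let s := PySem.Set.ofList strategy
        some (match common with
              | none => s
              | some c => PySem.Set.inter c s)) none
    first.filter (fun a =>
      match common with
      | none => true
      | some c => decide (a ∈ c))

-- ===== PRECONDITION & SPEC =====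
-- Pre_ excludes only the empty list of strategies, on which both Pythons raise IndexError.
def Pre_get_common_actions (strategies : List (List String)) : Prop := strategies ≠ []
instance (strategies : List (List String)) : Decidable (Pre_get_common_actions strategies) := by unfold Pre_get_common_actions; infer_instance
def pvWitness_get_common_actions : List (List String) := [["a", "b"], ["b"]]

def Spec_get_common_actions (strategies : List (List String)) (out : List String) : Prop := out = get_common_actions_alt strategies
instance (strategies : List (List String)) (out : List String) : Decidable (Spec_get_common_actions strategies out) := by unfold Spec_get_common_actions; infer_instance

-- ===== CLAIM (what is proved, stated in full; the proofs are below) =====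
def Claim_equal_get_common_actions : Prop := ∀ (strategies : List (List String)), Dom_get_common_actions strategies → Pre_get_common_actions strategies → Spec_get_common_actions strategies (get_common_actions strategies)

-- ===== LEMMAS AND PROOFS =====

-- A's inner flag loop computes "action is in every tail strategy".
theorem flag_fold_eq_all (a : String) (l : List (List String)) (b : Bool) :
    l.foldl (fun flag strategy => if a ∉ strategy then false else flag) b
      = (b && l.all (fun st => decide (a ∈ st))) := by
  induction l generalizing b with
  | nil => simp
  | cons s l ih =>
    simp only [List.foldl_cons, List.all_cons, ih]
    by_cases h : a ∈ s <;> simp [h]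

-- B's fold over a nonempty tail, restarted from a concrete set.
theorem inter_fold_some (c : PySem.Set String) (l : List (List String)) :
    l.foldl (fun common strategy =>
        some (match common with
              | none => PySem.Set.ofList strategy
              | some c => PySem.Set.inter c (PySem.Set.ofList strategy))) (some c)
      = some (l.foldl (fun c strategy => PySem.Set.inter c (PySem.Set.ofList strategy)) c) := by
  induction l generalizing c with
  | nil => rfl
  | cons s l ih => simpa using ih (PySem.Set.inter c (PySem.Set.ofList s))

theorem mem_inter_fold (a : String) (c : PySem.Set String) (l : List (List String)) :
    (a ∈ l.foldl (fun c strategy => PySem.Set.inter c (PySem.Set.ofList strategy)) c)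
      ↔ (a ∈ c ∧ ∀ st ∈ l, a ∈ st) := by
  induction l generalizing c with
  | nil => simp
  | cons s l ih =>
    simp only [List.foldl_cons, ih, PySem.Set.mem_inter, PySem.Set.mem_ofList,
      List.mem_cons]
    constructor
    · rintro ⟨⟨h1, h2⟩, h3⟩
      exact ⟨h1, fun st hst => hst.elim (fun e => e ▸ h2) (h3 st)⟩
    · rintro ⟨h1, h2⟩
      exact ⟨⟨h1, h2 s (Or.inl rfl)⟩, fun st hst => h2 st (Or.inr hst)⟩

theorem flatten_map_singleton (f : List String) : (List.map (fun x => [x]) f).flatten = f := by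
  induction f with
  | nil => rfl
  | cons x xs ih => simp [ih]

-- ===== VERDICT (by name: the statement is the Claim_ definition above) =====
theorem get_common_actions_spec : Claim_equal_get_common_actions := by
  intro strategies _ hpre
  unfold Spec_get_common_actions get_common_actions get_common_actions_alt
  match strategies with
  | [] => exact absurd rfl hpre
  | first :: rest =>
    simp only
    match rest with
    | [] =>
      simp
      exact flatten_map_singleton first
    | s0 :: l =>
      rw [show List.foldl
            (fun common strategy =>
              some
                (match common with
                | none => PySem.Set.ofList strategy
                | some c => PySem.Set.inter c (PySem.Set.ofList strategy)))
            none (s0 :: l)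
          = some (l.foldl (fun c strategy => PySem.Set.inter c (PySem.Set.ofList strategy)) (PySem.Set.ofList s0)) from by
          simp only [List.foldl_cons, inter_fold_some]]
      simp only [flag_fold_eq_all, Bool.true_and,
        PySem.List.foldl_append_if_eq_filter, List.nil_append]
      apply List.filter_congr
      intro a _
      rw [Bool.eq_iff_iff]
      simp only [Bool.and_eq_true, decide_eq_true_eq, List.all_eq_true, List.all_cons,
        mem_inter_fold, PySem.Set.mem_ofList]
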